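-- pv_equiv track=rewrite | github.com/yushyn-andriy/algo | competitions/onlinejudge/unsorted/401/p401.py | get_string_type
-- ===== SOURCE A (Python) =====
-- from enum import Enum
--
-- ch_to_reverse_map = {
--     'A': 'A',
--     'E': '3',
--     'H': 'H',
--     'I': 'I',
--     'J': 'L',
--     'L': 'J',
--     'M': 'M',
--     'O': 'O',
--     'S': '2',
--     'T': 'T',
--     'U': 'U',
--     'V': 'V',
--
--     'W': 'W',
--     'X': 'X',
--     'Y': 'Y',
--     'Z': '5',
--
--     '1': '1',
--     '2': 'S',
--     '3': 'E',
--     '5': 'Z',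
--     '8': '8',
-- }
--
-- class SType(Enum):
--     not_palindrome = '-- is not a palindrome.'
--     regular_palindrome = '-- is a regular palindrome.'
--     mirrored_string = '-- is a mirrored string.'
--     mirrored_palindrome = '-- is a mirrored palindrome.'
--
-- def get_string_type(s):
--     i, j = 0, len(s) - 1
--
--     regular_palindrome = True
--     mirrored_string = True
--     while i <= j:
--         if not regular_palindrome and not mirrored_string:
--             return SType.not_palindrome.value
--
--         if s[i] != s[j]:
--             regular_palindrome = False
--
--         ch1 = ch_to_reverse_map.get(s[i])
--         ch2 = ch_to_reverse_map.get(s[j])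
--
--         if (
--             ch1 is None or
--             ch2 is None or
--             ch1 != s[j] or
--             ch2 != s[i]
--         ):
--             mirrored_string = False
--
--         i+=1
--         j-=1
--
--     res = {
--         (True, True): SType.mirrored_palindrome.value,
--         (True, False): SType.regular_palindrome.value,
--         (False, True): SType.mirrored_string.value,
--         (False, False): SType.not_palindrome.value,
--     }
--
--     return res[(regular_palindrome, mirrored_string)]
-- ===== SOURCE B (Python) =====
-- from enum import Enum
--
-- ch_to_reverse_map = {
--     'A': 'A', 'E': '3', 'H': 'H', 'I': 'I', 'J': 'L', 'L': 'J',
--     'M': 'M', 'O': 'O', 'S': '2', 'T': 'T', 'U': 'U', 'V': 'V',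
--     'W': 'W', 'X': 'X', 'Y': 'Y', 'Z': '5',
--     '1': '1', '2': 'S', '3': 'E', '5': 'Z', '8': '8',
-- }
--
-- class SType(Enum):
--     not_palindrome = '-- is not a palindrome.'
--     regular_palindrome = '-- is a regular palindrome.'
--     mirrored_string = '-- is a mirrored string.'
--     mirrored_palindrome = '-- is a mirrored palindrome.'
--
-- def get_string_type(s):
--     n = len(s)
--     regular = (s == s[::-1])
--     mirrored = all(ch_to_reverse_map.get(c) == s[n - 1 - i]
--                    for i, c in enumerate(s))
--     return {
--         (True, True): SType.mirrored_palindrome.value,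
--         (True, False): SType.regular_palindrome.value,
--         (False, True): SType.mirrored_string.value,
--         (False, False): SType.not_palindrome.value,
--     }[(regular, mirrored)]
-- ===== Notes on version B (the rewrite author's own statement) =====
-- stated objective: simpler
-- what changed: Replaced A's fused two-pointer while loop with early exit and two mutable flags by two independent whole-string passes (reverse comparison for the palindrome test, an all() over enumerate for the mirror test) feeding the same result table.
import Mathlib
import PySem

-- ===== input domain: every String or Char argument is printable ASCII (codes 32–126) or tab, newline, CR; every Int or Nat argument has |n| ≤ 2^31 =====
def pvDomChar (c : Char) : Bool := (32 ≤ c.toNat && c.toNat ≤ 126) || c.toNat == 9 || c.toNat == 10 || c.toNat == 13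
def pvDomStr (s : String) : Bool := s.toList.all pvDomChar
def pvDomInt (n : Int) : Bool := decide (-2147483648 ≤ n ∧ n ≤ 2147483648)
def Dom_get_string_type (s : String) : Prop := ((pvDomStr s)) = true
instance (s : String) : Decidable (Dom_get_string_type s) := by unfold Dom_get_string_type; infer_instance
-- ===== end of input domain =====

-- B replaces A's fused two-pointer loop with an early exit by two whole-string passes
-- (reverse comparison and an `all` over enumerate) plus the same result table (objective: simpler).

-- ch_to_reverse_map (module constant shared by A and B)
def pvRevMap : PySem.Dict Char Char := PySem.Dict.ofList
  [('A','A'),('E','3'),('H','H'),('I','I'),('J','L'),('L','J'),('M','M'),('O','O'),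
   ('S','2'),('T','T'),('U','U'),('V','V'),('W','W'),('X','X'),('Y','Y'),('Z','5'),
   ('1','1'),('2','S'),('3','E'),('5','Z'),('8','8')]

-- ===== PORT A =====
-- the while loop; inside the loop 0 ≤ i ≤ j ≤ len-1 always holds, so pyGetD is exact for s[i], s[j]
def pvLoopA (cs : List Char) (i j : Int) (rp ms : Bool) : String :=
  if h : i ≤ j then
    if !rp && !ms then "-- is not a palindrome."
    else
      let si := PySem.List.pyGetD cs i ' '
      let sj := PySem.List.pyGetD cs j ' '
      let rp' := if si ≠ sj then false else rp
      let ch1 := PySem.Dict.get? pvRevMap si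
      let ch2 := PySem.Dict.get? pvRevMap sj
      let ms' := if ch1 = none ∨ ch2 = none ∨ ch1 ≠ some sj ∨ ch2 ≠ some si then false else ms
      pvLoopA cs (i + 1) (j - 1) rp' ms'
  else
    match rp, ms with
    | true, true => "-- is a mirrored palindrome."
    | true, false => "-- is a regular palindrome."
    | false, true => "-- is a mirrored string."
    | false, false => "-- is not a palindrome."
termination_by (j - i + 1).toNat
decreasing_by simp_wf; omega

def get_string_type (s : String) : String :=
  pvLoopA s.toList 0 (PySem.Str.len s - 1) true true

-- ===== PORT B =====
def get_string_type_alt (s : String) : String :=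
  let cs := s.toList
  let n : Int := cs.length
  -- s == s[::-1]  (s[::-1] via PySem.List.slice? … (-1))
  let regular := some cs == PySem.List.slice? cs none none (-1)
  -- all(ch_to_reverse_map.get(c) == s[n-1-i] for i, c in enumerate(s))
  let mirrored := (PySem.List.enumerate cs).all
    (fun p => PySem.Dict.get? pvRevMap p.2 == PySem.List.pyGet? cs (n - 1 - p.1))
  match regular, mirrored with
  | true, true => "-- is a mirrored palindrome."
  | true, false => "-- is a regular palindrome."
  | false, true => "-- is a mirrored string."
  | false, false => "-- is not a palindrome."

-- ===== PRECONDITION & SPEC =====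
def Spec_get_string_type (s : String) (out : String) : Prop := out = get_string_type_alt s
instance (s : String) (out : String) : Decidable (Spec_get_string_type s out) := by unfold Spec_get_string_type; infer_instance

-- ===== CLAIM (what is proved, stated in full; the proofs are below) =====
def Claim_equal_get_string_type : Prop := ∀ (s : String), Dom_get_string_type s → Spec_get_string_type s (get_string_type s)

-- ===== LEMMAS AND PROOFS =====

def pvTable (rp ms : Bool) : String :=
  match rp, ms with
  | true, true => "-- is a mirrored palindrome."
  | true, false => "-- is a regular palindrome."
  | false, true => "-- is a mirrored string."
  | false, false => "-- is not a palindrome."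

def pvPal (cs : List Char) (i j : Int) : Bool :=
  if h : i ≤ j then
    (PySem.List.pyGetD cs i ' ' == PySem.List.pyGetD cs j ' ') && pvPal cs (i + 1) (j - 1)
  else true
termination_by (j - i + 1).toNat
decreasing_by simp_wf; omega

def pvMir (cs : List Char) (i j : Int) : Bool :=
  if h : i ≤ j then
    (PySem.Dict.get? pvRevMap (PySem.List.pyGetD cs i ' ') == some (PySem.List.pyGetD cs j ' ')) &&
    (PySem.Dict.get? pvRevMap (PySem.List.pyGetD cs j ' ') == some (PySem.List.pyGetD cs i ' ')) &&
    pvMir cs (i + 1) (j - 1)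
  else true
termination_by (j - i + 1).toNat
decreasing_by simp_wf; omega

lemma pvLoopA_eq_table (cs : List Char) (i j : Int) (rp ms : Bool) :
    pvLoopA cs i j rp ms = pvTable (rp && pvPal cs i j) (ms && pvMir cs i j) := by
  induction i, j, rp, ms using pvLoopA.induct (cs := cs) with
  | case1 i j rp ms h hret =>
      rw [pvLoopA.eq_def, pvPal, pvMir]
      simp only [h, dif_pos, if_pos hret]
      have hrp : rp = false := by revert hret; cases rp <;> cases ms <;> simp
      have hms : ms = false := by revert hret; cases rp <;> cases ms <;> simp
      subst hrp; subst hms; rfl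
  | case2 i j rp ms h hret si sj rp' ch1 ch2 ms' ih =>
      rw [pvLoopA.eq_def, pvPal, pvMir]
      simp only [h, dif_pos, if_neg hret]
      simp only [si, sj, rp', ch1, ch2, ms', dite_eq_ite] at ih
      rw [ih]
      congr 1
      · by_cases he : PySem.List.pyGetD cs i ' ' = PySem.List.pyGetD cs j ' ' <;> simp [he]
      · by_cases h1 : PySem.Dict.get? pvRevMap (PySem.List.pyGetD cs i ' ') = some (PySem.List.pyGetD cs j ' ') <;>
        by_cases h2 : PySem.Dict.get? pvRevMap (PySem.List.pyGetD cs j ' ') = some (PySem.List.pyGetD cs i ' ') <;>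
          simp [h1, h2]
  | case3 i j h => rw [pvLoopA.eq_def, pvPal, pvMir]; simp [h]; rfl
  | case4 i j h => rw [pvLoopA.eq_def, pvPal, pvMir]; simp [h]; rfl
  | case5 i j h => rw [pvLoopA.eq_def, pvPal, pvMir]; simp [h]; rfl
  | case6 i j h => rw [pvLoopA.eq_def, pvPal, pvMir]; simp [h]; rfl

lemma pvPal_iff (cs : List Char) (i j : Int) :
    pvPal cs i j = true ↔
      ∀ k : Int, i ≤ k → k ≤ j →
        PySem.List.pyGetD cs k ' ' = PySem.List.pyGetD cs (i + j - k) ' ' := by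
  induction i, j using pvPal.induct with
  | case1 i j h ih =>
      rw [pvPal]
      simp only [h, dif_pos, Bool.and_eq_true, beq_iff_eq, ih]
      constructor
      · rintro ⟨hij, hrest⟩ k hk1 hk2
        by_cases hki : k = i
        · subst hki; simpa using hij
        by_cases hkj : k = j
        · subst hkj; simp only [show i + k - k = i by omega]; exact hij.symm
        · have := hrest k (by omega) (by omega)
          simpa [show i + 1 + (j - 1) - k = i + j - k by omega] using this
      · intro hall
        refine ⟨?_, fun k hk1 hk2 => ?_⟩
        · have := hall i le_rfl h; simpa using this
        · have := hall k (by omega) (by omega)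
          simpa [show i + 1 + (j - 1) - k = i + j - k by omega] using this
  | case2 i j h =>
      rw [pvPal]
      simp only [h, dif_neg, not_false_iff, true_iff]
      intro k hk1 hk2; omega

lemma pvMir_iff (cs : List Char) (i j : Int) :
    pvMir cs i j = true ↔
      ∀ k : Int, i ≤ k → k ≤ j →
        PySem.Dict.get? pvRevMap (PySem.List.pyGetD cs k ' ') =
          some (PySem.List.pyGetD cs (i + j - k) ' ') := by
  induction i, j using pvMir.induct with
  | case1 i j h ih =>
      rw [pvMir]
      simp only [h, dif_pos, Bool.and_eq_true, beq_iff_eq, ih]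
      constructor
      · rintro ⟨⟨h1, h2⟩, hrest⟩ k hk1 hk2
        by_cases hki : k = i
        · subst hki; simpa [show k + j - k = j by omega] using h1
        by_cases hkj : k = j
        · subst hkj; simpa [show i + k - k = i by omega] using h2
        · have := hrest k (by omega) (by omega)
          simpa [show i + 1 + (j - 1) - k = i + j - k by omega] using this
      · intro hall
        refine ⟨⟨?_, ?_⟩, fun k hk1 hk2 => ?_⟩
        · have := hall i le_rfl h; simpa using this
        · have := hall j h le_rfl; simpa [show i + j - j = i by omega] using this
        · have := hall k (by omega) (by omega)
          simpa [show i + 1 + (j - 1) - k = i + j - k by omega] using this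
  | case2 i j h =>
      rw [pvMir]
      simp only [h, dif_neg, not_false_iff, true_iff]
      intro k hk1 hk2; omega

-- the ∀-over-index-pairs form of A's palindrome test is B's reverse-equality
lemma pvPal_eq_regular (cs : List Char) :
    pvPal cs 0 ((cs.length : Int) - 1) = (cs == cs.reverse) := by
  rw [Bool.eq_iff_iff, pvPal_iff]
  simp only [beq_iff_eq]
  constructor
  · intro hall
    apply List.ext_getElem (by simp)
    intro k hk hk'
    rw [List.getElem_reverse]
    have e1 := PySem.List.pyGetD_eq_getElem cs (i := (k : Int)) ' ' (by omega) (by exact_mod_cast hk)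
    have e2 := PySem.List.pyGetD_eq_getElem cs (i := 0 + ((cs.length : Int) - 1) - (k : Int)) ' '
      (by omega) (by omega)
    have := hall (k : Int) (by omega) (by omega)
    rw [e1, e2] at this
    simpa [show ((0 : Int) + ((cs.length : Int) - 1) - (k : Int)).toNat = cs.length - 1 - k
      by omega] using this
  · intro heq k hk1 hk2
    have hkn : k.toNat < cs.length := by omega
    have e1 := PySem.List.pyGetD_eq_getElem cs (i := k) ' ' hk1 (by omega)
    have e2 := PySem.List.pyGetD_eq_getElem cs (i := 0 + ((cs.length : Int) - 1) - k) ' '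
      (by omega) (by omega)
    rw [e1, e2]
    have hrev : cs[k.toNat] = cs.reverse[k.toNat]'(by simpa using hkn) := List.getElem_of_eq heq _
    rw [List.getElem_reverse] at hrev
    simpa [show ((cs.length : Int) - 1 - k).toNat = cs.length - 1 - k.toNat
      by omega] using hrev

-- all over enumerate as a ∀ over Nat indices
lemma pvAll_enumerate_iff (cs : List Char) (st : Int) (f : Int × Char → Bool) :
    (PySem.List.enumerate cs st).all f = true ↔
      ∀ (k : Nat) (h : k < cs.length), f (st + k, cs[k]) = true := by
  induction cs generalizing st with
  | nil => simp [PySem.List.enumerate_nil]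
  | cons x xs ih =>
      rw [PySem.List.enumerate_cons]
      simp only [List.all_cons, Bool.and_eq_true, ih]
      constructor
      · rintro ⟨h0, hrest⟩ k hk
        cases k with
        | zero => simpa using h0
        | succ m =>
            have hm := hrest m (by simpa using hk)
            have he : st + 1 + (m : Int) = st + ((m + 1 : Nat) : Int) := by push_cast; ring
            rw [he] at hm
            simpa using hm
      · intro hall
        refine ⟨by simpa using hall 0 (by simp), fun m hm => ?_⟩
        have := hall (m + 1) (by simpa using hm)
        have he : st + ((m + 1 : Nat) : Int) = st + 1 + (m : Int) := by push_cast; ring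
        rw [he] at this
        simpa using this

lemma pvMir_eq_mirrored (cs : List Char) :
    pvMir cs 0 ((cs.length : Int) - 1) =
      (PySem.List.enumerate cs).all
        (fun p => PySem.Dict.get? pvRevMap p.2 ==
          PySem.List.pyGet? cs ((cs.length : Int) - 1 - p.1)) := by
  rw [Bool.eq_iff_iff, pvMir_iff, pvAll_enumerate_iff cs 0]
  constructor
  · intro hall k hk
    have := hall (k : Int) (by omega) (by omega)
    have e1 := PySem.List.pyGetD_eq_getElem cs (i := (k : Int)) ' ' (by omega) (by exact_mod_cast hk)
    have e2 := PySem.List.pyGetD_eq_getElem cs (i := 0 + ((cs.length : Int) - 1) - (k : Int)) ' '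
      (by omega) (by omega)
    rw [e1, e2] at this
    simp only [Int.toNat_natCast] at this
    have e3 := PySem.List.pyGet?_eq_some_getElem cs
      (i := (cs.length : Int) - 1 - ((0 : Int) + (k : Int))) (by omega) (by omega)
    simp only [beq_iff_eq]
    rw [e3]
    simp only [show ((cs.length : Int) - 1 - ((0 : Int) + (k : Int))).toNat =
      ((0 : Int) + ((cs.length : Int) - 1) - (k : Int)).toNat by omega]
    exact this
  · intro hall k hk1 hk2
    have hkn : k.toNat < cs.length := by omega
    have hmem := hall k.toNat hkn
    simp only [beq_iff_eq] at hmem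
    have e3 := PySem.List.pyGet?_eq_some_getElem cs
      (i := (cs.length : Int) - 1 - ((0 : Int) + (k.toNat : Int))) (by omega) (by omega)
    rw [e3] at hmem
    have e1 := PySem.List.pyGetD_eq_getElem cs (i := k) ' ' (by omega) (by omega)
    have e2 := PySem.List.pyGetD_eq_getElem cs (i := 0 + ((cs.length : Int) - 1) - k) ' '
      (by omega) (by omega)
    rw [e1, e2]
    simp only [show ((cs.length : Int) - 1 - ((0 : Int) + (k.toNat : Int))).toNat =
      ((0 : Int) + ((cs.length : Int) - 1) - k).toNat by omega] at hmem
    exact hmem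

-- ===== VERDICT (by name: the statement is the Claim_ definition above) =====
theorem get_string_type_spec : Claim_equal_get_string_type := by
  intro s _
  show get_string_type s = get_string_type_alt s
  unfold get_string_type get_string_type_alt
  rw [pvLoopA_eq_table]
  simp only [Bool.true_and, PySem.Str.len_eq]
  rw [pvPal_eq_regular, pvMir_eq_mirrored, PySem.List.slice?_none_none_neg_one]
  have hs : (some s.toList == some s.toList.reverse) = (s.toList == s.toList.reverse) := by
    rfl
  rw [hs]
  cases h1 : (s.toList == s.toList.reverse) <;>
    cases h2 : (PySem.List.enumerate s.toList).all fun p =>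
      pvRevMap.get? p.2 == PySem.List.pyGet? s.toList (↑s.toList.length - 1 - p.1) <;> rfl
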